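-- pv_equiv track=rewrite | github.com/orlykor/intro2cs-ex6 | balanced_brackets.py | violated_balanced
-- ===== SOURCE A (Python) =====
-- def violated_balanced(s):
--     '''
--     this func checks if the amount of "(" is equal to the amount of ")".
--     if it is then it returns -1, if not it checks recursivley in another
--     function wheter the counter is negetive or not. the counter counts
--     for ")" minus 1 and plus 1 for the other. if the counter is negetive, then
--     stop and start returning -1 and we add 1 until we get the index we
--     found the problem in.
--     every step in the recursia we make a new list without the s of the old
--     one, we go that way until we get that the lenght is 0, then we start
--     returning 0 and we add 1 to get the lengh of the string.
--     '''
--     counter = 0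
--     i = 0
--     OFFSET = 1
--     RETURN_INDEX = -1
--     RETURN_LENGTH = 0
--
--     while i < len(s):
--         if s[i] == "(" :
--             counter += 1
--         elif s[i] == ")":
--             counter -= 1
--         if counter < 0:
--             break
--         i += 1
--     if counter > 0 or counter < 0:
--         counter = 0
--     else:
--         return -1
--     def find_violated(s,counter):
--         if counter < 0:
--             return -1
--         elif len(s) == 0:
--             return 0
--         if s[0] == "(":
--             counter += 1
--         elif s[0] == ")":
--             counter -= 1
--
--         return find_violated(s[1:len(s)],counter) + 1
--
--     condition= find_violated(s,counter)
--     return condition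
-- ===== SOURCE B (Python) =====
-- def violated_balanced(s):
--     bal = 0
--     for i, ch in enumerate(s):
--         if ch == "(":
--             bal += 1
--         elif ch == ")":
--             bal -= 1
--         if bal < 0:
--             return i
--     return -1 if bal == 0 else len(s)
-- ===== Notes on version B (the rewrite author's own statement) =====
-- stated objective: faster
-- what changed: Replaced A's two passes (a while-scan plus a recursive pass that rebuilds a slice s[1:] at every step) with one linear scan tracking the running balance, returning the index as soon as it goes negative.
import Mathlib
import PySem

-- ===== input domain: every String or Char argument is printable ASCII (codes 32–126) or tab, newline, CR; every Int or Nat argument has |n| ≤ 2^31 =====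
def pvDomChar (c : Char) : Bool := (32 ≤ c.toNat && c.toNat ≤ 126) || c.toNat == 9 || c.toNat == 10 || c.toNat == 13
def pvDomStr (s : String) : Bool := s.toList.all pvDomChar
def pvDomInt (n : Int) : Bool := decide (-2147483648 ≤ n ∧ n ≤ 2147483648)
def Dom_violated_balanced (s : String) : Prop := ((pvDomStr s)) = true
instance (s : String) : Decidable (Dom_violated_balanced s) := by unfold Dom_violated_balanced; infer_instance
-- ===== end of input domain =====

-- B replaces A's while-scan + quadratic recursive re-scan (which slices s[1:] each step)
-- with a single linear pass over the characters; return value only, no side effects.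

-- ===== PORT A =====
-- A's counter update: +1 for '(', -1 for ')', unchanged otherwise.
def vbStepA (ch : Char) (c : Int) : Int :=
  if ch = '(' then c + 1 else if ch = ')' then c - 1 else c

-- A's while loop: walk the characters keeping `counter`, breaking as soon as it goes negative.
def vbScan : List Char → Int → Int
  | [], c => c
  | ch :: rest, c =>
    if vbStepA ch c < 0 then vbStepA ch c else vbScan rest (vbStepA ch c)

-- A's inner recursive helper find_violated(s, counter).
def vbFind (s : List Char) (c : Int) : Int :=
  if c < 0 then -1
  else
    match s with
    | [] => 0
    | ch :: rest => vbFind rest (vbStepA ch c) + 1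

def violated_balanced (s : String) : Int :=
  let counter := vbScan s.toList 0
  if counter > 0 ∨ counter < 0 then vbFind s.toList 0 else -1

-- ===== PORT B =====
-- B's balance update (same update rule, written for B's loop).
def vbStepB (ch : Char) (bal : Int) : Int :=
  if ch = '(' then bal + 1 else if ch = ')' then bal - 1 else bal

-- B's single loop: index i and running balance; return i on first negative balance.
def vbAltGo : List Char → Int → Int → Int → Int
  | [], _, bal, n => if bal = 0 then -1 else n
  | ch :: rest, i, bal, n =>
    if vbStepB ch bal < 0 then i else vbAltGo rest (i + 1) (vbStepB ch bal) n

def violated_balanced_alt (s : String) : Int :=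
  vbAltGo s.toList 0 0 (s.toList.length : Int)

-- ===== PRECONDITION & SPEC =====
def Spec_violated_balanced (s : String) (out : Int) : Prop := out = violated_balanced_alt s
instance (s : String) (out : Int) : Decidable (Spec_violated_balanced s out) := by unfold Spec_violated_balanced; infer_instance

-- ===== CLAIM (what is proved, stated in full; the proofs are below) =====
def Claim_equal_violated_balanced : Prop := ∀ (s : String), Dom_violated_balanced s → Spec_violated_balanced s (violated_balanced s)

-- ===== LEMMAS AND PROOFS =====

theorem vbStepB_eq (ch : Char) (c : Int) : vbStepB ch c = vbStepA ch c := rfl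

-- B's loop, started at a nonnegative balance, equals: the absolute index of the first
-- violation (i + vbFind) when the scan goes negative, else -1 or n by the final balance.
theorem vbAltGo_eq (l : List Char) : ∀ (c i n : Int), 0 ≤ c →
    vbAltGo l i c n =
      (if vbScan l c < 0 then i + vbFind l c
       else if vbScan l c = 0 then -1 else n) := by
  induction l with
  | nil =>
    intro c i n hc
    simp only [vbAltGo, vbScan, vbFind]
    have : ¬ c < 0 := by omega
    split_ifs <;> omega
  | cons ch rest ih =>
    intro c i n hc
    have hcn : ¬ c < 0 := by omega
    simp only [vbAltGo, vbScan, vbFind, if_neg hcn, vbStepB_eq]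
    by_cases h : vbStepA ch c < 0
    · have hf : vbFind rest (vbStepA ch c) = -1 := by
        unfold vbFind; rw [if_pos h]
      simp only [if_pos h, hf]
      omega
    · have h0 : 0 ≤ vbStepA ch c := by omega
      simp only [if_neg h]
      rw [ih _ (i + 1) n h0]
      by_cases hneg : vbScan rest (vbStepA ch c) < 0
      · simp only [if_pos hneg]; ring
      · simp only [if_neg hneg]

-- if the scan never goes negative, A's find_violated returns the length.
theorem vbFind_len (l : List Char) : ∀ (c : Int), 0 ≤ c → ¬ vbScan l c < 0 →
    vbFind l c = (l.length : Int) := by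
  induction l with
  | nil =>
    intro c hc _
    unfold vbFind; simp [show ¬ c < 0 by omega]
  | cons ch rest ih =>
    intro c hc hns
    have hcn : ¬ c < 0 := by omega
    have h2 : ¬ vbStepA ch c < 0 := by
      intro h
      apply hns
      simp only [vbScan, if_pos h]; exact h
    have h3 : vbScan (ch :: rest) c = vbScan rest (vbStepA ch c) := by
      simp only [vbScan, if_neg h2]
    unfold vbFind
    rw [if_neg hcn]
    show vbFind rest (vbStepA ch c) + 1 = ((ch :: rest).length : Int)
    rw [ih (vbStepA ch c) (by omega) (by rw [← h3]; exact hns)]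
    simp only [List.length_cons]
    push_cast; ring

theorem main_eq (s : String) : violated_balanced s = violated_balanced_alt s := by
  unfold violated_balanced violated_balanced_alt
  rw [vbAltGo_eq s.toList 0 0 (s.toList.length : Int) le_rfl]
  by_cases hneg : vbScan s.toList 0 < 0
  · simp only [if_pos hneg, if_pos (Or.inr hneg)]
    omega
  · by_cases hz : vbScan s.toList 0 = 0
    · simp [hz]
    · have hpos : vbScan s.toList 0 > 0 := by omega
      simp only [if_neg hneg, if_neg hz, if_pos (Or.inl hpos)]
      exact vbFind_len s.toList 0 le_rfl hneg

-- ===== VERDICT (by name: the statement is the Claim_ definition above) =====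
theorem violated_balanced_spec : Claim_equal_violated_balanced := by
  intro s _
  unfold Spec_violated_balanced
  exact main_eq s
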